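-- pv_equiv track=rewrite | github.com/shivam-shukla-71/GFG_PeoblemOfTheDay | Problems/Seating_Arrangement.py | is_possible_to_get_seats
-- ===== SOURCE A (Python) =====
-- def is_possible_to_get_seats( n : int, m : int, seats : int) -> bool:
--         # code here
--         if(n==0):return True
--         if sum(seats) > len(seats) - n:
--             return False  # not enough seats for all people
--         prev_seat = -2
--         for i, seat in enumerate(seats):
--             if seat == 1:
--                 prev_seat = i
--                 continue
--             if i - prev_seat == 1:
--                 continue
--             if i == len(seats) - 1 or seats[i+1] == 0:
--                 n -= 1
--                 prev_seat = i
--                 if n == 0: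
--                     return True
--         return False
-- ===== SOURCE B (Python) =====
-- def is_possible_to_get_seats(n: int, m: int, seats: int) -> bool:
--     if n == 0:
--         return True
--     if sum(seats) > len(seats) - n:
--         return False  # not enough free seats for all people
--     # Right-to-left DP: for the suffix already processed, cap_blocked / cap_free
--     # is the number of people seatable when the seat just left of the suffix
--     # is taken / free; nxt is the first value of that suffix.
--     cap_blocked = cap_free = 0
--     nxt = None
--     for s in reversed(seats):
--         if s == 1:
--             cap_blocked = cap_free = cap_blocked
--         elif nxt is None or nxt == 0:
--             cap_blocked, cap_free = cap_free, 1 + cap_blocked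
--         else:
--             cap_blocked = cap_free
--         nxt = s
--     return 1 <= n <= cap_free
-- ===== Notes on version B (the rewrite author's own statement) =====
-- stated objective: alternative
-- what changed: Replaces the left-to-right greedy seating simulation (mutable prev_seat, countdown of n, early return) by a right-to-left two-register DP fold that computes the seating capacity of every suffix for both 'previous seat taken'/'free' entry states, then compares n against the capacity once; the initial feasibility reject is kept.
import Mathlib
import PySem

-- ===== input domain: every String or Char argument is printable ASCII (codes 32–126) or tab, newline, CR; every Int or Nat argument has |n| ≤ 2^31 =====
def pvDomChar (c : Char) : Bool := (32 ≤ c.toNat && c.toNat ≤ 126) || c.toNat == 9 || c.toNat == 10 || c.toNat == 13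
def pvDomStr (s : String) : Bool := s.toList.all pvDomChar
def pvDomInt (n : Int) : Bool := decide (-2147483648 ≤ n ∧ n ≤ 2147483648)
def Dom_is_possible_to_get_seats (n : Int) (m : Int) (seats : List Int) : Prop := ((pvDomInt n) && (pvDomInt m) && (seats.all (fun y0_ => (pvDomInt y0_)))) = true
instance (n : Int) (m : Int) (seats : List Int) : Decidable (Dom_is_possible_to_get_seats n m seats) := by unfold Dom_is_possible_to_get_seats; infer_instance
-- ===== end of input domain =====

-- B replaces A's left-to-right greedy seating simulation (mutable prev_seat, early return)
-- by a right-to-left two-register DP computing the capacity, compared against n once.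


-- ===== PORT A =====
-- the for-loop over enumerate(seats): state (i, prev_seat, n), early return on n == 0
def pvLoopA : List Int → Int → Int → Int → Bool
  | [], _, _, _ => false
  | seat :: rest, i, prev, n =>
    if seat = 1 then pvLoopA rest (i + 1) i n
    else if i - prev = 1 then pvLoopA rest (i + 1) prev n
    else if rest.isEmpty || rest.head? = some 0 then
      -- `i == len(seats)-1` is `rest = []`; `seats[i+1] == 0` is `rest.head? = some 0`
      (if n - 1 = 0 then true else pvLoopA rest (i + 1) i (n - 1))
    else pvLoopA rest (i + 1) prev n

def is_possible_to_get_seats (n : Int) (m : Int) (seats : List Int) : Bool :=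
  if n = 0 then true
  else if seats.sum > (seats.length : Int) - n then false
  else pvLoopA seats 0 (-2) n

-- ===== PORT B =====
-- one DP step of Source B's loop body; state (cap_blocked, cap_free, nxt)
def pvStepB (st : Int × Int × Option Int) (s : Int) : Int × Int × Option Int :=
  if s = 1 then (st.1, st.1, some s)
  else if st.2.2 = none ∨ st.2.2 = some 0 then (st.2.1, 1 + st.1, some s)
  else (st.2.1, st.2.1, some s)

def is_possible_to_get_seats_alt (n : Int) (m : Int) (seats : List Int) : Bool :=
  if n = 0 then true
  else if seats.sum > (seats.length : Int) - n then false
  else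
    let st := seats.reverse.foldl pvStepB (0, 0, none)
    decide (1 ≤ n ∧ n ≤ st.2.1)

-- ===== PRECONDITION & SPEC =====
-- A is total on well-typed inputs, so no Pre_ is needed.
def Spec_is_possible_to_get_seats (n : Int) (m : Int) (seats : List Int) (out : Bool) : Prop := out = is_possible_to_get_seats_alt n m seats
instance (n : Int) (m : Int) (seats : List Int) (out : Bool) : Decidable (Spec_is_possible_to_get_seats n m seats out) := by unfold Spec_is_possible_to_get_seats; infer_instance

-- ===== CLAIM (what is proved, stated in full; the proofs are below) =====
def Claim_equal_is_possible_to_get_seats : Prop := ∀ (n : Int) (m : Int) (seats : List Int), Dom_is_possible_to_get_seats n m seats → Spec_is_possible_to_get_seats n m seats (is_possible_to_get_seats n m seats)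

-- ===== LEMMAS AND PROOFS =====

-- greedy placement count, A's loop state abstracted to "previous cell occupied"
def gcount : List Int → Bool → Nat
  | [], _ => 0
  | s :: rest, b =>
    if s = 1 then gcount rest true
    else if b then gcount rest false
    else if rest.isEmpty || rest.head? = some 0 then gcount rest true + 1
    else gcount rest false

theorem loopA_eq_gcount (l : List Int) : ∀ (i p n : Int), 1 ≤ i - p →
    pvLoopA l i p n = decide (1 ≤ n ∧ n ≤ (gcount l (decide (i - p = 1)) : Int)) := by
  induction l with
  | nil => intro i p n _; simp [pvLoopA, gcount]; omega
  | cons s rest ih =>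
    intro i p n h
    by_cases h1 : s = 1
    · rw [show pvLoopA (s :: rest) i p n = pvLoopA rest (i + 1) i n by simp [pvLoopA, h1]]
      rw [ih (i + 1) i n (by omega)]
      simp [gcount, h1]
    · by_cases h2 : i - p = 1
      · rw [show pvLoopA (s :: rest) i p n = pvLoopA rest (i + 1) p n by
          simp [pvLoopA, h1, h2]]
        rw [ih (i + 1) p n (by omega)]
        simp [gcount, h1, h2]
        rw [show decide ((i + 1) - p = 1) = false from decide_eq_false (by omega)]
      · by_cases h3 : (rest.isEmpty || rest.head? = some 0) = true
        · rw [show pvLoopA (s :: rest) i p n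
              = (if n - 1 = 0 then true else pvLoopA rest (i + 1) i (n - 1)) by
            simp [pvLoopA, h1, h2]; intro hc; simp [hc] at h3; simp [h3]]
          rw [show gcount (s :: rest) (decide (i - p = 1)) = gcount rest true + 1 by
            simp [gcount, h1, h2, h3]]
          by_cases hn : n - 1 = 0
          · simp [hn]; omega
          · rw [if_neg hn, ih (i + 1) i (n - 1) (by omega)]
            rw [show decide ((i : Int) + 1 - i = 1) = true from decide_eq_true (by omega)]
            rw [Bool.eq_iff_iff]; simp; omega
        · rw [show pvLoopA (s :: rest) i p n = pvLoopA rest (i + 1) p n by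
            simp [pvLoopA, h1, h2]; intro hc; simp [hc] at h3]
          rw [ih (i + 1) p n (by omega)]
          rw [show gcount (s :: rest) (decide (i - p = 1)) = gcount rest false by
            simp [gcount, h1, h2, h3]]
          rw [show decide ((i + 1) - p = 1) = false from decide_eq_false (by omega)]

theorem foldl_stepB_eq_gcount (l : List Int) :
    l.reverse.foldl pvStepB ((0 : Int), (0 : Int), (none : Option Int))
      = ((gcount l true : Int), (gcount l false : Int), l.head?) := by
  induction l with
  | nil => simp [gcount]
  | cons s t ih =>
    rw [List.reverse_cons, List.foldl_append, ih]
    simp only [List.foldl_cons, List.foldl_nil]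
    by_cases h1 : s = 1
    · simp [pvStepB, gcount, h1]
    · by_cases h3 : (t.isEmpty || t.head? = some 0) = true
      · have hc : t.head? = none ∨ t.head? = some 0 := by
          rcases t with _ | ⟨x, t'⟩
          · left; rfl
          · right; simpa using h3
        rw [show pvStepB ((gcount t true : Int), (gcount t false : Int), t.head?) s
            = ((gcount t false : Int), 1 + (gcount t true : Int), some s) by
          simp only [pvStepB, if_neg h1, if_pos hc]]
        rw [show gcount (s :: t) true = gcount t false by simp [gcount, h1]]
        rw [show gcount (s :: t) false = gcount t true + 1 by simp [gcount, h1, h3]]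
        simp only [Prod.mk.injEq, List.head?_cons]
        refine ⟨trivial, by push_cast; ring, trivial⟩
      · have hc : ¬ (t.head? = none ∨ t.head? = some 0) := by
          rcases t with _ | ⟨x, t'⟩
          · simp at h3
          · simpa using h3
        rw [show pvStepB ((gcount t true : Int), (gcount t false : Int), t.head?) s
            = ((gcount t false : Int), (gcount t false : Int), some s) by
          simp only [pvStepB, if_neg h1, if_neg hc]]
        rw [show gcount (s :: t) true = gcount t false by simp [gcount, h1]]
        rw [show gcount (s :: t) false = gcount t false by simp [gcount, h1, h3]]
        simp

-- ===== VERDICT (by name: the statement is the Claim_ definition above) =====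
theorem is_possible_to_get_seats_spec : Claim_equal_is_possible_to_get_seats := by
  intro n m seats _
  unfold Spec_is_possible_to_get_seats
  unfold is_possible_to_get_seats is_possible_to_get_seats_alt
  by_cases hn : n = 0
  · simp [hn]
  · rw [if_neg hn, if_neg hn]
    by_cases hsum : seats.sum > (seats.length : Int) - n
    · rw [if_pos hsum, if_pos hsum]
    · rw [if_neg hsum, if_neg hsum, loopA_eq_gcount seats 0 (-2) n (by omega)]
      rw [foldl_stepB_eq_gcount seats]
      rw [Bool.eq_iff_iff]
      norm_num
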